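-- pv_equiv track=rewrite | github.com/cybelewang/leetcode-python | Companies/Uber_numberOf3Partitions.py | numPartitions
-- ===== SOURCE A (Python) =====
-- def numPartitions(arr):
--     n = len(arr)
--     left = [0] # left[i] is the sum of arr[:i]
--     for num in arr:
--         left.append(left[-1] + num)
--
--     right = [0] # right[i] is the sum of arr[n-i:]
--     for num in reversed(arr):
--         right.append(right[-1] + num)
--
--     total = left[-1]
--     res = 0
--     for i in range(1, n-1):
--         first = left[i]
--         for j in range(i+1, n):
--             third = right[n-j]
--             second = total - first - third
--             if first <= second <= third:
--                 res += 1
--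
--     return res
-- ===== SOURCE B (Python) =====
-- def _bl(a, x):
--     # index of the first element >= x in sorted list a (bisect_left)
--     lo, hi = 0, len(a)
--     while lo < hi:
--         mid = (lo + hi) // 2
--         if a[mid] < x:
--             lo = mid + 1
--         else:
--             hi = mid
--     return lo
--
--
-- def _br(a, x):
--     # index after the last element <= x in sorted list a (bisect_right)
--     lo, hi = 0, len(a)
--     while lo < hi:
--         mid = (lo + hi) // 2
--         if x < a[mid]:
--             hi = mid
--         else:
--             lo = mid + 1
--     return lo
--
--
-- def numPartitions(arr):
--     n = len(arr)
--     pre = [0]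
--     for x in arr:
--         pre.append(pre[-1] + x)
--     total = pre[-1]
--     # first <= second <= third  <=>  2*pre[i] <= pre[j] <= (total + pre[i]) // 2
--     vals = []  # sorted prefix sums pre[j] for the cut points j still ahead of i
--     res = 0
--     for i in range(n - 2, 0, -1):
--         v = pre[i + 1]
--         vals.insert(_bl(vals, v), v)
--         lo = 2 * pre[i]
--         hi = (total + pre[i]) // 2
--         if lo <= hi:
--             res += _br(vals, hi) - _bl(vals, lo)
--     return res
-- ===== Notes on version B (the rewrite author's own statement) =====
-- stated objective: faster
-- what changed: A checks every (i,j) cut pair against prefix/suffix-sum arrays; B rewrites the two inequalities as a value-range query on prefix sums (2*pre[i] <= pre[j] <= (total+pre[i])//2), scans i descending while keeping the later prefix sums in a sorted list, and counts each i's admissible j's by hand-written binary search.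
import Mathlib
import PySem

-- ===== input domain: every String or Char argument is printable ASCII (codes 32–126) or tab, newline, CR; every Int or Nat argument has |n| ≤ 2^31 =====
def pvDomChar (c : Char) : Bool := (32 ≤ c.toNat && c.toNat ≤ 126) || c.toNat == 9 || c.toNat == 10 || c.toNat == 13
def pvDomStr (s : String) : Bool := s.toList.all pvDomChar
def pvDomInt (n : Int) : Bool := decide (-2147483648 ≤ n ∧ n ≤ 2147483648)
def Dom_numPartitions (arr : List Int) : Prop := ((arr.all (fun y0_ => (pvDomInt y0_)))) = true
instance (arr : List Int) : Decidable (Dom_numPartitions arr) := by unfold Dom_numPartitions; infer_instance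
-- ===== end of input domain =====

-- B replaces A's quadratic scan over all (i,j) cut pairs by one descending scan over i that keeps the later
-- prefix sums in a sorted list and counts the admissible j's by binary search (measured faster at large sizes).

-- ===== PORT A =====
def numPartitions (arr : List Int) : Int :=
  let n : Int := arr.length
  let left : List Int := arr.foldl (fun acc num => acc ++ [PySem.List.pyGetD acc (-1) 0 + num]) [0]
  let right : List Int := arr.reverse.foldl (fun acc num => acc ++ [PySem.List.pyGetD acc (-1) 0 + num]) [0]
  let total : Int := PySem.List.pyGetD left (-1) 0
  (PySem.List.pyRange 1 (n - 1) 1).foldl (fun res i =>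
    let first := PySem.List.pyGetD left i 0
    (PySem.List.pyRange (i + 1) n 1).foldl (fun res j =>
      let third := PySem.List.pyGetD right (n - j) 0
      let second := total - first - third
      if first ≤ second ∧ second ≤ third then res + 1 else res) res) 0

-- ===== PORT B =====
-- hand-written bisect_left loop of Source B; fuel = hi - lo at the call makes the while-loop structural
-- (indices are always in range in every call, so List.getD is exact for a[mid])
def pvBlGo (a : List Int) (x : Int) : Nat → Nat → Nat → Nat
  | 0, lo, _hi => lo
  | fuel + 1, lo, hi =>
    if lo < hi then
      let mid := (lo + hi) / 2
      if a.getD mid 0 < x then pvBlGo a x fuel (mid + 1) hi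
      else pvBlGo a x fuel lo mid
    else lo

def pvBl (a : List Int) (x : Int) : Nat := pvBlGo a x a.length 0 a.length

-- hand-written bisect_right loop of Source B
def pvBrGo (a : List Int) (x : Int) : Nat → Nat → Nat → Nat
  | 0, lo, _hi => lo
  | fuel + 1, lo, hi =>
    if lo < hi then
      let mid := (lo + hi) / 2
      if x < a.getD mid 0 then pvBrGo a x fuel lo mid
      else pvBrGo a x fuel (mid + 1) hi
    else lo

def pvBr (a : List Int) (x : Int) : Nat := pvBrGo a x a.length 0 a.length

def numPartitions_alt (arr : List Int) : Int :=
  let n : Int := arr.length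
  let pre : List Int := arr.foldl (fun acc x => acc ++ [PySem.List.pyGetD acc (-1) 0 + x]) [0]
  let total : Int := PySem.List.pyGetD pre (-1) 0
  let st := (PySem.List.pyRange (n - 2) 0 (-1)).foldl (fun (st : List Int × Int) i =>
      let v := PySem.List.pyGetD pre (i + 1) 0
      let vals := PySem.List.insert st.1 ((pvBl st.1 v : Nat) : Int) v
      let lo := 2 * PySem.List.pyGetD pre i 0
      let hi := PySem.Int.floordiv (total + PySem.List.pyGetD pre i 0) 2
      if lo ≤ hi then (vals, st.2 + ((pvBr vals hi : Int) - (pvBl vals lo : Int)))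
      else (vals, st.2)) ([], 0)
  st.2

-- ===== PRECONDITION & SPEC =====
def Spec_numPartitions (arr : List Int) (out : Int) : Prop := out = numPartitions_alt arr
instance (arr : List Int) (out : Int) : Decidable (Spec_numPartitions arr out) := by unfold Spec_numPartitions; infer_instance

-- ===== CLAIM (what is proved, stated in full; the proofs are below) =====
def Claim_equal_numPartitions : Prop := ∀ (arr : List Int), Dom_numPartitions arr → Spec_numPartitions arr (numPartitions arr)

-- ===== LEMMAS AND PROOFS =====

-- prefix sum of the first k elements (Int index, proof-side abbreviation)
def pvP (arr : List Int) (k : Int) : Int := (arr.take k.toNat).sum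

-- the common specification both ports are reduced to:
-- for every first cut i, count the second cuts j with 2*pre[i] ≤ pre[j] and 2*pre[j] ≤ total + pre[i]
def pvCond (arr : List Int) (i : Int) (v : Int) : Bool :=
  decide (2 * pvP arr i ≤ v ∧ 2 * v ≤ arr.sum + pvP arr i)

def pvC (arr : List Int) (i : Int) : Int :=
  (((PySem.List.pyRange (i + 1) (arr.length : Int) 1).map (fun j => pvP arr j)).countP (pvCond arr i) : Int)

def pvSpec (arr : List Int) : Int :=
  ((PySem.List.pyRange 1 ((arr.length : Int) - 1) 1).map (fun i => pvC arr i)).sum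

-- the scan loop shared by both Pythons builds the list of all prefix sums
lemma pv_scan_eq (arr : List Int) :
    arr.foldl (fun acc num => acc ++ [PySem.List.pyGetD acc (-1) 0 + num]) [0]
      = (List.range (arr.length + 1)).map (fun k => ((arr.take k).sum : Int)) := by
  induction arr using List.reverseRecOn with
  | nil => simp
  | append_singleton xs x ih =>
    rw [List.foldl_append, ih, List.foldl_cons, List.foldl_nil]
    have hsplit : (List.range (xs.length + 1)).map (fun k => ((xs.take k).sum : Int))
        = (List.range xs.length).map (fun k => ((xs.take k).sum : Int)) ++ [xs.sum] := by
      rw [List.range_succ, List.map_append]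
      simp
    rw [hsplit, PySem.List.pyGetD_neg_one_append_singleton]
    have hlen : (xs ++ [x]).length = xs.length + 1 := by simp
    rw [hlen]
    have hx : List.map (fun k => (((xs ++ [x]).take k).sum : Int)) (List.range (xs.length + 1))
        = List.map (fun k => ((xs.take k).sum : Int)) (List.range (xs.length + 1)) := by
      apply List.map_congr_left
      intro k hk
      rw [List.mem_range] at hk
      rw [List.take_append]
      have h0 : k - xs.length = 0 := by omega
      simp [h0]
    conv_rhs => rw [List.range_succ, List.map_append, hx, hsplit]
    have h1 : ((xs ++ [x]).take (xs.length + 1)).sum = xs.sum + x := by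
      rw [List.take_of_length_le (by simp)]
      simp
    simp [h1]

lemma pv_getD_scan (arr : List Int) (i : Int) (h0 : 0 ≤ i) (h1 : i ≤ arr.length) :
    PySem.List.pyGetD ((List.range (arr.length + 1)).map (fun k => ((arr.take k).sum : Int))) i 0
      = pvP arr i := by
  have hlen : ((List.range (arr.length + 1)).map (fun k => ((arr.take k).sum : Int))).length = arr.length + 1 := by simp
  rw [PySem.List.pyGetD_eq_getElem _ _ h0 (by rw [hlen]; omega)]
  rw [List.getElem_map, List.getElem_range]
  rfl

lemma pv_total_scan (arr : List Int) :
    PySem.List.pyGetD ((List.range (arr.length + 1)).map (fun k => ((arr.take k).sum : Int))) (-1) 0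
      = arr.sum := by
  have hsplit : (List.range (arr.length + 1)).map (fun k => ((arr.take k).sum : Int))
      = (List.range arr.length).map (fun k => ((arr.take k).sum : Int)) ++ [arr.sum] := by
    rw [List.range_succ, List.map_append]
    simp
  rw [hsplit, PySem.List.pyGetD_neg_one_append_singleton]

-- suffix sums via the reversed scan: right[k] = sum of the last k elements
lemma pv_right_scan (arr : List Int) (k : Int) (h0 : 0 ≤ k) (h1 : k ≤ arr.length) :
    PySem.List.pyGetD ((List.range (arr.length + 1)).map (fun t => ((arr.reverse.take t).sum : Int))) k 0
      = arr.sum - pvP arr ((arr.length : Int) - k) := by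
  have hlen : ((List.range (arr.length + 1)).map (fun t => ((arr.reverse.take t).sum : Int))).length = arr.length + 1 := by simp
  rw [PySem.List.pyGetD_eq_getElem _ _ h0 (by rw [hlen]; omega)]
  rw [List.getElem_map, List.getElem_range]
  rw [List.take_reverse, List.sum_reverse]
  have h2 : ((arr.length : Int) - k).toNat = arr.length - k.toNat := by omega
  unfold pvP
  rw [h2]
  have := List.sum_take_add_sum_drop arr (arr.length - k.toNat)
  omega

-- ===== A = pvSpec =====
lemma pv_A_eq_spec (arr : List Int) : numPartitions arr = pvSpec arr := by
  simp only [numPartitions]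
  rw [pv_scan_eq arr, pv_scan_eq arr.reverse, pv_total_scan arr]
  simp only [List.length_reverse]
  rw [PySem.List.foldl_congr_mem _ _ (fun res i => res + pvC arr i) 0 ?_]
  · rw [PySem.List.foldl_add]
    simp [pvSpec]
  · intro res i hi
    rw [PySem.List.mem_pyRange_one] at hi
    rw [PySem.List.foldl_ite_add_one]
    congr 1
    unfold pvC
    rw [List.countP_map]
    congr 1
    apply List.countP_congr
    intro j hj
    rw [PySem.List.mem_pyRange_one] at hj
    rw [pv_getD_scan arr i (by omega) (by omega)]
    rw [pv_right_scan arr ((arr.length : Int) - j) (by omega) (by omega)]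
    have hjj : (arr.length : Int) - ((arr.length : Int) - j) = j := by ring
    rw [hjj]
    simp only [Function.comp, pvCond]
    constructor
    · intro hc
      simp only [decide_eq_true_eq] at hc ⊢
      omega
    · intro hc
      simp only [decide_eq_true_eq] at hc ⊢
      omega

-- ===== B-side toolkit =====
lemma pv_countP_of_cut (a : List Int) (p : Int → Bool) (r : Nat) (hr : r ≤ a.length)
    (h : ∀ j (hj : j < a.length), (p a[j] = true ↔ j < r)) : a.countP p = r := by
  induction a generalizing r with
  | nil =>
    simp only [List.length_nil, Nat.le_zero] at hr
    subst hr
    simp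
  | cons b t ih =>
    rcases r with _ | s
    · have hb : ¬ p b = true := by
        have := (h 0 (by simp)).mp
        simpa using this
      have ht : t.countP p = 0 := by
        rw [List.countP_eq_zero]
        intro y hy
        rcases List.getElem_of_mem hy with ⟨j, hj, rfl⟩
        have := (h (j + 1) (by simp; omega)).mp
        simpa using this
      simp [hb, ht]
    · have hb : p b = true := by
        have := (h 0 (by simp)).mpr
        simpa using this (by omega)
      have ht : t.countP p = s := by
        apply ih s (by simp at hr; omega)
        intro j hj
        have h2 := h (j + 1) (by simp; omega)
        simp only [List.getElem_cons_succ] at h2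
        constructor
        · intro hp
          have := h2.mp hp
          omega
        · intro hs
          exact h2.mpr (by omega)
      simp [hb, ht]

lemma pv_blGo_inv (a : List Int) (x : Int) (hs : a.Pairwise (· ≤ ·)) :
    ∀ fuel lo hi, hi ≤ a.length → lo ≤ hi → hi - lo ≤ fuel →
    (∀ j (hj : j < a.length), j < lo → a[j] < x) →
    (∀ j (hj : j < a.length), hi ≤ j → x ≤ a[j]) →
    lo ≤ pvBlGo a x fuel lo hi ∧ pvBlGo a x fuel lo hi ≤ hi ∧
      (∀ j (hj : j < a.length), j < pvBlGo a x fuel lo hi → a[j] < x) ∧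
      (∀ j (hj : j < a.length), pvBlGo a x fuel lo hi ≤ j → x ≤ a[j]) := by
  intro fuel
  induction fuel with
  | zero =>
    intro lo hi hhi hlo hfuel h1 h2
    have : lo = hi := by omega
    subst this
    refine ⟨Nat.le_refl _, Nat.le_refl _, h1, fun j hj hle => h2 j hj hle⟩
  | succ fuel ih =>
    intro lo hi hhi hlo hfuel h1 h2
    by_cases hlt : lo < hi
    · have hmid : (lo + hi) / 2 < hi := by omega
      have hmidlo : lo ≤ (lo + hi) / 2 := by omega
      have hmlen : (lo + hi) / 2 < a.length := by omega
      have hget : a.getD ((lo + hi) / 2) 0 = a[(lo + hi) / 2] := List.getD_eq_getElem a 0 hmlen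
      have hmono := List.pairwise_iff_getElem.mp hs
      by_cases hc : a.getD ((lo + hi) / 2) 0 < x
      · have hrec := ih ((lo + hi) / 2 + 1) hi hhi (by omega) (by omega)
          (fun j hj hjlt => by
            rcases Nat.lt_or_ge j lo with hl | hg
            · exact h1 j hj hl
            · rcases Nat.lt_or_ge j ((lo + hi) / 2) with hl2 | hg2
              · calc a[j] ≤ a[(lo + hi) / 2] := hmono j _ hj hmlen hl2
                  _ < x := by rwa [hget] at hc
              · have : j = (lo + hi) / 2 := by omega
                subst this
                rwa [hget] at hc)
          h2
        have hunf : pvBlGo a x (fuel + 1) lo hi = pvBlGo a x fuel ((lo + hi) / 2 + 1) hi := by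
          simp only [pvBlGo, if_pos hlt, if_pos hc]
        rw [hunf]
        exact ⟨le_trans (by omega) hrec.1, hrec.2.1, hrec.2.2.1, hrec.2.2.2⟩
      · have hxle : x ≤ a[(lo + hi) / 2] := by
          rw [hget] at hc
          omega
        have hrec := ih lo ((lo + hi) / 2) (by omega) (by omega) (by omega) h1
          (fun j hj hge => by
            rcases Nat.lt_or_ge j hi with hl | hg
            · rcases Nat.eq_or_lt_of_le hge with rfl | hlt2
              · exact hxle
              · exact le_trans hxle (hmono _ j hmlen hj hlt2)
            · exact h2 j hj hg)
        have hunf : pvBlGo a x (fuel + 1) lo hi = pvBlGo a x fuel lo ((lo + hi) / 2) := by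
          simp only [pvBlGo, if_pos hlt, if_neg hc]
        rw [hunf]
        exact ⟨hrec.1, le_trans hrec.2.1 (by omega), hrec.2.2.1, hrec.2.2.2⟩
    · have heq : lo = hi := by omega
      have hunf : pvBlGo a x (fuel + 1) lo hi = lo := by
        simp only [pvBlGo, if_neg hlt]
      rw [hunf]
      subst heq
      exact ⟨Nat.le_refl _, Nat.le_refl _, h1, fun j hj hle => h2 j hj hle⟩

lemma pv_brGo_inv (a : List Int) (x : Int) (hs : a.Pairwise (· ≤ ·)) :
    ∀ fuel lo hi, hi ≤ a.length → lo ≤ hi → hi - lo ≤ fuel →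
    (∀ j (hj : j < a.length), j < lo → a[j] ≤ x) →
    (∀ j (hj : j < a.length), hi ≤ j → x < a[j]) →
    lo ≤ pvBrGo a x fuel lo hi ∧ pvBrGo a x fuel lo hi ≤ hi ∧
      (∀ j (hj : j < a.length), j < pvBrGo a x fuel lo hi → a[j] ≤ x) ∧
      (∀ j (hj : j < a.length), pvBrGo a x fuel lo hi ≤ j → x < a[j]) := by
  intro fuel
  induction fuel with
  | zero =>
    intro lo hi hhi hlo hfuel h1 h2
    have : lo = hi := by omega
    subst this
    refine ⟨Nat.le_refl _, Nat.le_refl _, h1, fun j hj hle => h2 j hj hle⟩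
  | succ fuel ih =>
    intro lo hi hhi hlo hfuel h1 h2
    by_cases hlt : lo < hi
    · have hmid : (lo + hi) / 2 < hi := by omega
      have hmidlo : lo ≤ (lo + hi) / 2 := by omega
      have hmlen : (lo + hi) / 2 < a.length := by omega
      have hget : a.getD ((lo + hi) / 2) 0 = a[(lo + hi) / 2] := List.getD_eq_getElem a 0 hmlen
      have hmono := List.pairwise_iff_getElem.mp hs
      by_cases hc : x < a.getD ((lo + hi) / 2) 0
      · have hxlt : x < a[(lo + hi) / 2] := by rwa [hget] at hc
        have hrec := ih lo ((lo + hi) / 2) (by omega) (by omega) (by omega) h1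
          (fun j hj hge => by
            rcases Nat.lt_or_ge j hi with hl | hg
            · rcases Nat.eq_or_lt_of_le hge with rfl | hlt2
              · exact hxlt
              · exact lt_of_lt_of_le hxlt (hmono _ j hmlen hj hlt2)
            · exact h2 j hj hg)
        have hunf : pvBrGo a x (fuel + 1) lo hi = pvBrGo a x fuel lo ((lo + hi) / 2) := by
          simp only [pvBrGo, if_pos hlt, if_pos hc]
        rw [hunf]
        exact ⟨hrec.1, le_trans hrec.2.1 (by omega), hrec.2.2.1, hrec.2.2.2⟩
      · have hle : a[(lo + hi) / 2] ≤ x := by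
          rw [hget] at hc
          omega
        have hrec := ih ((lo + hi) / 2 + 1) hi hhi (by omega) (by omega)
          (fun j hj hjlt => by
            rcases Nat.lt_or_ge j lo with hl | hg
            · exact h1 j hj hl
            · rcases Nat.lt_or_ge j ((lo + hi) / 2) with hl2 | hg2
              · exact le_trans (hmono j _ hj hmlen hl2) hle
              · have : j = (lo + hi) / 2 := by omega
                subst this
                exact hle)
          h2
        have hunf : pvBrGo a x (fuel + 1) lo hi = pvBrGo a x fuel ((lo + hi) / 2 + 1) hi := by
          simp only [pvBrGo, if_pos hlt, if_neg hc]
        rw [hunf]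
        exact ⟨le_trans (by omega) hrec.1, hrec.2.1, hrec.2.2.1, hrec.2.2.2⟩
    · have heq : lo = hi := by omega
      have hunf : pvBrGo a x (fuel + 1) lo hi = lo := by
        simp only [pvBrGo, if_neg hlt]
      rw [hunf]
      subst heq
      exact ⟨Nat.le_refl _, Nat.le_refl _, h1, fun j hj hle => h2 j hj hle⟩

lemma pv_bl_inv (a : List Int) (x : Int) (hs : a.Pairwise (· ≤ ·)) :
    pvBl a x ≤ a.length ∧ (∀ j (hj : j < a.length), j < pvBl a x → a[j] < x) ∧
      (∀ j (hj : j < a.length), pvBl a x ≤ j → x ≤ a[j]) := by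
  have := pv_blGo_inv a x hs a.length 0 a.length (Nat.le_refl _) (Nat.zero_le _) (by omega)
    (fun j hj h => by omega) (fun j hj h => by omega)
  exact ⟨this.2.1, this.2.2.1, this.2.2.2⟩

lemma pv_bl_eq (a : List Int) (x : Int) (hs : a.Pairwise (· ≤ ·)) :
    a.countP (fun v => decide (v < x)) = pvBl a x := by
  have hinv := pv_bl_inv a x hs
  apply pv_countP_of_cut a _ _ hinv.1
  intro j hj
  constructor
  · intro hp
    by_contra hge
    have := hinv.2.2 j hj (by omega)
    simp at hp
    omega
  · intro hlt
    simpa using hinv.2.1 j hj hlt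

lemma pv_br_eq (a : List Int) (x : Int) (hs : a.Pairwise (· ≤ ·)) :
    a.countP (fun v => decide (v ≤ x)) = pvBr a x := by
  have hinv := pv_brGo_inv a x hs a.length 0 a.length (Nat.le_refl _) (Nat.zero_le _) (by omega)
    (fun j hj h => by omega) (fun j hj h => by omega)
  apply pv_countP_of_cut a _ _ hinv.2.1
  intro j hj
  constructor
  · intro hp
    by_contra hge
    have := hinv.2.2.2 j hj (by omega)
    simp at hp
    omega
  · intro hlt
    simpa using hinv.2.2.1 j hj hlt

lemma pv_insert_eq (xs : List Int) (i : Nat) (x : Int) (h : i ≤ xs.length) :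
    PySem.List.insert xs ((i : Nat) : Int) x = xs.take i ++ x :: xs.drop i := by
  simp [PySem.List.insert, PySem.List.sliceIndices]
  have h2 : ((if (i : Int) < 0 then max ((i : Int) + (xs.length : Int)) 0
      else min (i : Int) (xs.length : Int))).toNat = i := by
    rw [if_neg (by omega : ¬ ((i : Int) < 0))]
    omega
  rw [h2]

lemma pv_insert_sorted (a : List Int) (v : Int) (hs : a.Pairwise (· ≤ ·)) :
    (PySem.List.insert a ((pvBl a v : Nat) : Int) v).Pairwise (· ≤ ·) ∧
      (PySem.List.insert a ((pvBl a v : Nat) : Int) v).Perm (v :: a) := by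
  have hinv := pv_bl_inv a v hs
  have hr : pvBl a v ≤ a.length := hinv.1
  rw [pv_insert_eq _ _ _ hr]
  constructor
  · rw [List.pairwise_append]
    have hmono := List.pairwise_iff_getElem.mp hs
    refine ⟨List.Pairwise.sublist (List.take_sublist _ _) hs, ?_, ?_⟩
    · rw [List.pairwise_cons]
      refine ⟨?_, List.Pairwise.sublist (List.drop_sublist _ _) hs⟩
      intro y hy
      rw [List.mem_drop_iff_getElem] at hy
      rcases hy with ⟨j, hjm, rfl⟩
      exact hinv.2.2 _ (by omega) (by omega)
    · intro u hu y hy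
      rw [List.mem_take_iff_getElem] at hu
      rcases hu with ⟨j, hjm, rfl⟩
      rcases List.mem_cons.mp hy with rfl | hy2
      · exact le_of_lt (hinv.2.1 j (by omega) (by omega))
      · rw [List.mem_drop_iff_getElem] at hy2
        rcases hy2 with ⟨k, hkm, rfl⟩
        exact hmono j _ (by omega) (by omega) (by omega)
  · have hp := List.perm_middle (a := v) (l₁ := a.take (pvBl a v)) (l₂ := a.drop (pvBl a v))
    rwa [List.take_append_drop] at hp

lemma pv_countP_between (a : List Int) (lo hi : Int) (h : lo ≤ hi) :
    (a.countP (fun v => decide (v ≤ hi)) : Int) - (a.countP (fun v => decide (v < lo)) : Int)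
      = (a.countP (fun v => decide (lo ≤ v ∧ v ≤ hi)) : Int) := by
  induction a with
  | nil => simp
  | cons b t ih =>
    have hfun : (fun v => decide (lo ≤ v ∧ v ≤ hi)) = (fun v : Int => decide (lo ≤ v) && decide (v ≤ hi)) := by
      funext v
      simp
    rw [hfun] at ih ⊢
    simp only [List.countP_cons]
    by_cases h2 : b < lo
    · have h1 : b ≤ hi := by omega
      have h3 : ¬ (lo ≤ b) := by omega
      simp [h1, h2, h3]
      omega
    · by_cases h1 : b ≤ hi
      · have h3 : lo ≤ b := by omega
        simp [h1, h2, h3]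
        omega
      · simp [h1, h2]
        omega

lemma pv_le_fdiv_two (v t : Int) : v ≤ PySem.Int.floordiv t 2 ↔ 2 * v ≤ t := by
  unfold PySem.Int.floordiv; rw [Int.fdiv_eq_ediv]; simp; omega

-- the clean form of B's loop body (pre/total already rewritten to prefix sums)
def pvStepB (arr : List Int) (st : List Int × Int) (i : Int) : List Int × Int :=
  let v := pvP arr (i + 1)
  let vals := PySem.List.insert st.1 ((pvBl st.1 v : Nat) : Int) v
  let lo := 2 * pvP arr i
  let hi := PySem.Int.floordiv (arr.sum + pvP arr i) 2
  if lo ≤ hi then (vals, st.2 + ((pvBr vals hi : Int) - (pvBl vals lo : Int)))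
  else (vals, st.2)

lemma pv_loop_inv (arr : List Int) :
    ∀ (m : Nat), (m : Int) ≤ (arr.length : Int) - 2 → ∀ (vals : List Int) (res : Int),
    vals.Pairwise (· ≤ ·) →
    vals.Perm ((PySem.List.pyRange ((m : Int) + 2) (arr.length : Int) 1).map (fun j => pvP arr j)) →
    ((PySem.List.pyRange (m : Int) 0 (-1)).foldl (pvStepB arr) (vals, res)).2
      = res + ((PySem.List.pyRange 1 ((m : Int) + 1) 1).map (fun i => pvC arr i)).sum := by
  intro m
  induction m with
  | zero =>
    intro hm vals res hsort hperm
    rw [PySem.List.pyRange_neg_one_eq_nil (by norm_num), PySem.List.pyRange_one_eq_nil (by norm_num)]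
    simp
  | succ m ih =>
    intro hm vals res hsort hperm
    push_cast at hm hperm ⊢
    rw [PySem.List.pyRange_neg_one_cons (by omega : (0 : Int) < (m : Int) + 1), List.foldl_cons]
    have hins := pv_insert_sorted vals (pvP arr ((m : Int) + 1 + 1)) hsort
    have hperm' : (PySem.List.insert vals ((pvBl vals (pvP arr ((m : Int) + 1 + 1)) : Nat) : Int)
        (pvP arr ((m : Int) + 1 + 1))).Perm
        ((PySem.List.pyRange ((m : Int) + 2) (arr.length : Int) 1).map (fun j => pvP arr j)) := by
      refine hins.2.trans ?_
      rw [PySem.List.pyRange_one_cons (by omega : (m : Int) + 2 < (arr.length : Int)), List.map_cons]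
      have h22 : (m : Int) + 1 + 1 = (m : Int) + 2 := by ring
      have h33 : (m : Int) + 1 + 2 = (m : Int) + 3 := by ring
      rw [h22]
      refine List.Perm.cons _ (hperm.trans ?_)
      rw [h33, show (m : Int) + 2 + 1 = (m : Int) + 3 by ring]
    have hstep : pvStepB arr (vals, res) ((m : Int) + 1)
        = (PySem.List.insert vals ((pvBl vals (pvP arr ((m : Int) + 1 + 1)) : Nat) : Int)
            (pvP arr ((m : Int) + 1 + 1)), res + pvC arr ((m : Int) + 1)) := by
      have hC : pvC arr ((m : Int) + 1)
          = (((PySem.List.pyRange ((m : Int) + 2) (arr.length : Int) 1).map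
              (fun j => pvP arr j)).countP (pvCond arr ((m : Int) + 1)) : Int) := by
        unfold pvC
        rw [show (m : Int) + 1 + 1 = (m : Int) + 2 by ring]
      simp only [pvStepB]
      by_cases hlh : 2 * pvP arr ((m : Int) + 1)
          ≤ PySem.Int.floordiv (arr.sum + pvP arr ((m : Int) + 1)) 2
      · rw [if_pos hlh]
        refine Prod.ext rfl ?_
        have hbr := pv_br_eq _ (PySem.Int.floordiv (arr.sum + pvP arr ((m : Int) + 1)) 2) hins.1
        have hbl := pv_bl_eq _ (2 * pvP arr ((m : Int) + 1)) hins.1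
        have hbetween := pv_countP_between
          (PySem.List.insert vals ((pvBl vals (pvP arr ((m : Int) + 1 + 1)) : Nat) : Int)
            (pvP arr ((m : Int) + 1 + 1)))
          (2 * pvP arr ((m : Int) + 1)) (PySem.Int.floordiv (arr.sum + pvP arr ((m : Int) + 1)) 2) hlh
        simp only [← hbr, ← hbl]
        rw [hbetween, hC]
        congr 1
        rw [Nat.cast_inj]
        rw [List.Perm.countP_eq _ hperm']
        apply List.countP_congr
        intro y hy
        unfold pvCond
        have hfd := pv_le_fdiv_two y (arr.sum + pvP arr ((m : Int) + 1))
        constructor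
        · intro hc
          simp only [decide_eq_true_eq] at hc ⊢
          exact ⟨hc.1, hfd.mp hc.2⟩
        · intro hc
          simp only [decide_eq_true_eq] at hc ⊢
          exact ⟨hc.1, hfd.mpr hc.2⟩
      · rw [if_neg hlh]
        refine Prod.ext rfl ?_
        have hzero : ((PySem.List.pyRange ((m : Int) + 2) (arr.length : Int) 1).map
            (fun j => pvP arr j)).countP (pvCond arr ((m : Int) + 1)) = 0 := by
          rw [List.countP_eq_zero]
          intro y hy hc
          unfold pvCond at hc
          simp only [decide_eq_true_eq] at hc
          have hfd := (pv_le_fdiv_two y (arr.sum + pvP arr ((m : Int) + 1))).mpr hc.2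
          omega
        rw [hC, hzero]
        simp
    rw [hstep]
    rw [show (m : Int) + 1 - 1 = (m : Int) by ring]
    rw [ih (by omega) _ _ hins.1 hperm']
    rw [show (m : Int) + 1 + 1 = ((m : Int) + 1) + 1 from rfl,
      PySem.List.pyRange_one_succ_right (by omega : (1 : Int) ≤ (m : Int) + 1)]
    rw [List.map_append, List.sum_append]
    simp
    ring

lemma pv_B_eq_spec (arr : List Int) : numPartitions_alt arr = pvSpec arr := by
  simp only [numPartitions_alt]
  rw [pv_scan_eq arr, pv_total_scan arr]
  rw [PySem.List.foldl_congr_mem _ _ (pvStepB arr) ([], 0) ?_]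
  · by_cases hn : 2 ≤ arr.length
    · have hcast : ((arr.length : Int) - 2) = ((arr.length - 2 : Nat) : Int) := by omega
      rw [hcast]
      have hloop := pv_loop_inv arr (arr.length - 2) (by omega) [] 0 (List.Pairwise.nil) ?_
      · rw [hloop]
        unfold pvSpec
        rw [show ((arr.length - 2 : Nat) : Int) + 1 = (arr.length : Int) - 1 by omega]
        ring
      · rw [show ((arr.length - 2 : Nat) : Int) + 2 = (arr.length : Int) by omega]
        rw [PySem.List.pyRange_one_eq_nil (le_refl _)]
        simp
    · rw [PySem.List.pyRange_neg_one_eq_nil (by omega : (arr.length : Int) - 2 ≤ 0)]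
      unfold pvSpec
      rw [PySem.List.pyRange_one_eq_nil (by omega : (arr.length : Int) - 1 ≤ 1)]
      simp
  · intro st i hi
    rw [PySem.List.mem_pyRange_neg_one] at hi
    simp only [pvStepB]
    rw [pv_getD_scan arr (i + 1) (by omega) (by omega),
      pv_getD_scan arr i (by omega) (by omega)]

-- ===== VERDICT (by name: the statement is the Claim_ definition above) =====
theorem numPartitions_spec : Claim_equal_numPartitions := by
  intro arr _
  unfold Spec_numPartitions
  rw [pv_A_eq_spec, pv_B_eq_spec]
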